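-- pv_equiv track=rewrite | github.com/Kunnapabai/Content-AI-Generator | Khomesolution/scripts/optimize_research_data.py | optimize_structure
-- ===== SOURCE A (Python) =====
-- def optimize_structure(text: str) -> str:
--     """Inline short H3 sections as bold text."""
--     lines = text.split('\n')
--     result = []
--     i = 0
--     while i < len(lines):
--         line = lines[i]
--         if line.startswith('### '):
--             heading_text = line[4:].strip()
--             content_lines = []
--             j = i + 1
--             while j < len(lines) and not lines[j].startswith('#'):
--                 if lines[j].strip():
--                     content_lines.append(lines[j].strip())
--                 j += 1
--             if len(content_lines) <= 3:
--                 combined = f"**{heading_text}**: {' '.join(content_lines)}"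
--                 result.append(combined)
--                 result.append('')
--                 i = j
--                 continue
--         result.append(line)
--         i += 1
--     return '\n'.join(result)
-- ===== SOURCE B (Python) =====
-- def optimize_structure(text: str) -> str:
--     """Inline short H3 sections as bold text (block-partition rewrite)."""
--     lines = text.split('\n')
--     # First pass: partition lines into blocks -- a leading block of lines before
--     # the first '#' line, then one block per heading line plus its non-'#' lines.
--     blocks = []
--     cur = []
--     for ln in lines:
--         if ln.startswith('#'):
--             blocks.append(cur)
--             cur = [ln]
--         else:
--             cur.append(ln)
--     blocks.append(cur)
--     # Second pass: render each block.
--     out = []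
--     for b in blocks:
--         if b and b[0].startswith('### '):
--             content = [l.strip() for l in b[1:] if l.strip()]
--             if len(content) <= 3:
--                 out.append(f"**{b[0][4:].strip()}**: {' '.join(content)}")
--                 out.append('')
--                 continue
--         out.extend(b)
--     return '\n'.join(out)
-- ===== Notes on version B (the rewrite author's own statement) =====
-- stated objective: alternative
-- what changed: Replaced A's index-driven while loop with nested rescans by a two-pass block decomposition: partition the lines into heading-led blocks once, then render each block independently.
import Mathlib
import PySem

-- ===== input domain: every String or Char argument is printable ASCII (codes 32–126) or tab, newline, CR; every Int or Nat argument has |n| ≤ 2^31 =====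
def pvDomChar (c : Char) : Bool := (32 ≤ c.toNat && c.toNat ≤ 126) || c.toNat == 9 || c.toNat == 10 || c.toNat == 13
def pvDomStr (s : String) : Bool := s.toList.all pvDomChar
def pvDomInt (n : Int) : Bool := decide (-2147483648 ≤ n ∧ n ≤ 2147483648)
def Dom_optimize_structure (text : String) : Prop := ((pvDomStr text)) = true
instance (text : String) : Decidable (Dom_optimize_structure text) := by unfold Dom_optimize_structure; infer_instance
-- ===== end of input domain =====

-- B replaces A's index-driven while loop (with its inner rescan) by a two-pass block
-- decomposition: partition once into heading-led blocks, then render each block (objective: alternative).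

-- ===== PORT A =====
-- inner while loop of A: collects stripped non-blank lines until a '#' line; returns (content_lines, remaining suffix)
def aScan : List String → (List String × List String)
  | [] => ([], [])
  | l :: ls =>
    if PySem.Str.startswith l "#" then ([], l :: ls)
    else
      if PySem.Str.strip l != "" then (PySem.Str.strip l :: (aScan ls).1, (aScan ls).2)
      else ((aScan ls).1, (aScan ls).2)

theorem aScan_len_le (ls : List String) : (aScan ls).2.length ≤ ls.length := by
  induction ls with
  | nil => simp [aScan]
  | cons l ls ih =>
    simp only [aScan]
    split
    · simp
    · split <;> simpa using Nat.le_succ_of_le ih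

-- outer while loop of A, as recursion on the remaining suffix of lines
def aLoop : List String → List String
  | [] => []
  | line :: rest =>
    if PySem.Str.startswith line "### " then
      if (aScan rest).1.length ≤ 3 then
        ("**" ++ PySem.Str.strip (PySem.Str.slice line (some 4) none) ++ "**: "
            ++ PySem.Str.join " " (aScan rest).1) :: "" :: aLoop (aScan rest).2
      else line :: aLoop rest
    else line :: aLoop rest
termination_by ls => ls.length
decreasing_by
  · exact Nat.lt_succ_of_le (aScan_len_le rest)
  · simp
  · simp

def optimize_structure (text : String) : String :=
  PySem.Str.join "\n" (aLoop ((PySem.Str.split? text "\n").getD []))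

-- ===== PORT B =====
-- first pass of B: partition lines into a leading block plus one block per '#' heading line
def bBlocks (lines : List String) : List (List String) :=
  let bc := lines.foldl
    (fun (bc : List (List String) × List String) ln =>
      if PySem.Str.startswith ln "#" then (bc.1 ++ [bc.2], [ln]) else (bc.1, bc.2 ++ [ln]))
    ([], [])
  bc.1 ++ [bc.2]

-- second pass of B: render one block
def bRender (b : List String) : List String :=
  match b with
  | [] => []
  | b0 :: rest =>
    if PySem.Str.startswith b0 "### " then
      if ((rest.filter (fun l => PySem.Str.strip l != "")).map PySem.Str.strip).length ≤ 3 then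
        ["**" ++ PySem.Str.strip (PySem.Str.slice b0 (some 4) none) ++ "**: "
            ++ PySem.Str.join " " ((rest.filter (fun l => PySem.Str.strip l != "")).map PySem.Str.strip), ""]
      else b0 :: rest
    else b0 :: rest

def optimize_structure_alt (text : String) : String :=
  PySem.Str.join "\n" ((bBlocks ((PySem.Str.split? text "\n").getD [])).flatMap bRender)

-- ===== PRECONDITION & SPEC =====
def Spec_optimize_structure (text : String) (out : String) : Prop := out = optimize_structure_alt text
instance (text : String) (out : String) : Decidable (Spec_optimize_structure text out) := by unfold Spec_optimize_structure; infer_instance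

-- ===== CLAIM (what is proved, stated in full; the proofs are below) =====
def Claim_equal_optimize_structure : Prop := ∀ (text : String), Dom_optimize_structure text → Spec_optimize_structure text (optimize_structure text)

-- ===== LEMMAS AND PROOFS =====

-- abbreviation used only by the proofs
def notHash (l : String) : Bool := !PySem.Str.startswith l "#"

theorem sw3_imp_sw1 {cs : List Char} (h : PySem.Chars.startswith cs ['#', '#', '#', ' '] = true) :
    PySem.Chars.startswith cs ['#'] = true := by
  rw [PySem.Chars.startswith_iff] at h ⊢
  exact List.IsPrefix.trans (by decide) h

-- A's inner scan in terms of takeWhile / dropWhile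
theorem aScan_eq (ls : List String) :
    aScan ls = (((ls.takeWhile notHash).filter (fun l => PySem.Str.strip l != "")).map PySem.Str.strip,
                ls.dropWhile notHash) := by
  induction ls with
  | nil => simp [aScan]
  | cons l ls ih =>
    simp only [aScan]
    by_cases h : PySem.Str.startswith l "#"
    · have hc : PySem.Chars.startswith l.toList ['#'] = true := by simpa using h
      simp [hc, notHash]
    · have hc : PySem.Chars.startswith l.toList ['#'] = false := by simpa using h
      by_cases h2 : PySem.Str.strip l != ""
      · simp [hc, h2, ih, notHash]
      · simp [hc, h2, ih, notHash]

-- recursive characterisation of B's partition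
def groupHeads : List String → List (List String)
  | [] => []
  | h :: rest => (h :: rest.takeWhile notHash) :: groupHeads (rest.dropWhile notHash)
termination_by ls => ls.length
decreasing_by
  exact Nat.lt_succ_of_le (List.length_dropWhile_le _ _)

theorem bfold (lines : List String) (bs : List (List String)) (cur : List String) :
    ((lines.foldl
        (fun (bc : List (List String) × List String) ln =>
          if PySem.Str.startswith ln "#" then (bc.1 ++ [bc.2], [ln]) else (bc.1, bc.2 ++ [ln]))
        (bs, cur)).1
      ++ [(lines.foldl
        (fun (bc : List (List String) × List String) ln =>
          if PySem.Str.startswith ln "#" then (bc.1 ++ [bc.2], [ln]) else (bc.1, bc.2 ++ [ln]))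
        (bs, cur)).2])
    = bs ++ (cur ++ lines.takeWhile notHash) :: groupHeads (lines.dropWhile notHash) := by
  induction lines generalizing bs cur with
  | nil => simp [groupHeads]
  | cons l ls ih =>
    by_cases h : PySem.Str.startswith l "#"
    · have hc : PySem.Chars.startswith l.toList ['#'] = true := by simpa using h
      simpa [List.foldl_cons, hc, notHash, groupHeads]
        using ih (bs ++ [cur]) [l]
    · have hc : PySem.Chars.startswith l.toList ['#'] = false := by simpa using h
      simpa [List.foldl_cons, hc, notHash]
        using ih bs (cur ++ [l])

theorem bBlocks_eq (lines : List String) :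
    bBlocks lines = lines.takeWhile notHash :: groupHeads (lines.dropWhile notHash) := by
  simpa [bBlocks] using bfold lines [] []

theorem bRender_verbatim {b : List String} (h : ∀ l ∈ b, PySem.Chars.startswith l.toList ['#'] = false) :
    bRender b = b := by
  cases b with
  | nil => rfl
  | cons b0 rest =>
    have h0 : PySem.Chars.startswith b0.toList ['#', '#', '#', ' '] = false := by
      by_contra hcon
      have := sw3_imp_sw1 (by simpa using hcon)
      simp [h b0 (by simp)] at this
    simp [bRender, h0]

theorem bRender_takeWhile (ls : List String) :
    bRender (ls.takeWhile notHash) = ls.takeWhile notHash := by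
  refine bRender_verbatim (fun l hl => ?_)
  have := List.mem_takeWhile_imp hl
  simpa [notHash] using this

theorem takeWhile_dropWhile_nil (ls : List String) :
    (ls.dropWhile notHash).takeWhile notHash = [] := by
  cases hx : ls.dropWhile notHash with
  | nil => simp
  | cons a as =>
    have hne : ls.dropWhile notHash ≠ [] := by simp [hx]
    have ha : notHash ((ls.dropWhile notHash).head hne) = false := List.head_dropWhile_not notHash hne
    have ha' : notHash a = false := by
      simpa [hx] using ha
    simp [ha']

theorem main_eq (ls : List String) : aLoop ls = (bBlocks ls).flatMap bRender := by
  induction hn : ls.length using Nat.strong_induction_on generalizing ls with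
  | _ n ih =>
  cases ls with
  | nil => simp [aLoop, bBlocks_eq, groupHeads, bRender]
  | cons line rest =>
    by_cases h1 : PySem.Str.startswith line "#"
    · have h1c : PySem.Chars.startswith line.toList ['#'] = true := by simpa using h1
      -- heading line: the leading block of (line :: rest) is empty
      have ht : (line :: rest).takeWhile notHash = [] := by
        simp [notHash, h1c]
      have hd : (line :: rest).dropWhile notHash = line :: rest := by
        simp [notHash, h1c]
      rw [bBlocks_eq, ht, hd, groupHeads]
      by_cases h3 : PySem.Str.startswith line "### "
      · have h3c : PySem.Chars.startswith line.toList ['#', '#', '#', ' '] = true := by simpa using h3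
        by_cases hlen : (((rest.takeWhile notHash).filter (fun l => PySem.Str.strip l != "")).map PySem.Str.strip).length ≤ 3
        · -- short section: A inlines it and continues at the dropWhile suffix
          have ihd : aLoop (rest.dropWhile notHash) = (bBlocks (rest.dropWhile notHash)).flatMap bRender := by
            refine ih (rest.dropWhile notHash).length ?_ _ rfl
            subst hn
            exact Nat.lt_succ_of_le (List.length_dropWhile_le _ _)
          rw [bBlocks_eq, List.dropWhile_idempotent, takeWhile_dropWhile_nil] at ihd
          have hlen' : ((rest.takeWhile notHash).filter (fun l => PySem.Str.strip l != "")).length ≤ 3 := by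
            simpa using hlen
          rw [aLoop, if_pos h3, aScan_eq, if_pos (by simpa using hlen)]
          simp [List.flatMap_cons, bRender, h3c, hlen', ihd]
        · -- long section: A emits the heading verbatim and continues at rest
          have ihr : aLoop rest = (bBlocks rest).flatMap bRender := ih rest.length (by simp [← hn]) _ rfl
          rw [bBlocks_eq] at ihr
          have hlen' : ¬ ((rest.takeWhile notHash).filter (fun l => PySem.Str.strip l != "")).length ≤ 3 := by
            simpa using hlen
          rw [aLoop, if_pos h3, aScan_eq, if_neg (by simpa using hlen), ihr]
          simp only [List.flatMap_cons, bRender_takeWhile]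
          simp [bRender, h3c, hlen']
      · have h3c : PySem.Chars.startswith line.toList ['#', '#', '#', ' '] = false := by simpa using h3
        have ihr : aLoop rest = (bBlocks rest).flatMap bRender := ih rest.length (by simp [← hn]) _ rfl
        rw [bBlocks_eq] at ihr
        rw [aLoop, if_neg h3, ihr]
        simp only [List.flatMap_cons, bRender_takeWhile]
        simp [bRender, h3c]
    · have h1c : PySem.Chars.startswith line.toList ['#'] = false := by simpa using h1
      have h3 : PySem.Str.startswith line "### " = false := by
        by_contra hcon
        have : PySem.Chars.startswith line.toList ['#', '#', '#', ' '] = true := by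
          simpa using (by simpa using hcon : PySem.Str.startswith line "### " = true)
        exact absurd (sw3_imp_sw1 this) (by simp [h1c])
      have ihr : aLoop rest = (bBlocks rest).flatMap bRender := ih rest.length (by simp [← hn]) _ rfl
      rw [bBlocks_eq] at ihr
      rw [aLoop, if_neg (by rw [h3]; exact Bool.false_ne_true), ihr, bBlocks_eq]
      have hv : bRender (line :: rest.takeWhile notHash) = line :: rest.takeWhile notHash := by
        refine bRender_verbatim (fun l hl => ?_)
        rcases List.mem_cons.mp hl with rfl | hl
        · exact h1c
        · simpa [notHash] using List.mem_takeWhile_imp hl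
      simp [notHash, h1c, hv, bRender_takeWhile, List.flatMap_cons]

-- ===== VERDICT (by name: the statement is the Claim_ definition above) =====
theorem optimize_structure_spec : Claim_equal_optimize_structure := by
  intro text _
  unfold Spec_optimize_structure optimize_structure optimize_structure_alt
  rw [main_eq]
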